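-- pv_equiv track=rewrite | github.com/Genidiot/ChipViewEnhance | src/Draw/calculate_line.py | calculate_certain_logical_distances
-- ===== SOURCE A (Python) =====
-- def calculate_certain_logical_distances(units, direction='x'):
--     max_logical_distance = 6
--     dict_distance = {}
--     for logical_distance in range(1, max_logical_distance + 1):
--         dict_distance[logical_distance] = None
--         combination = []
--         for i in range(logical_distance):
--             if direction == 'x':
--                 combination.append(units[i+1][0] - units[i][0])
--             elif direction == 'y':
--                 combination.append(units[i+1][1] - units[i][1])
--         dict_distance[logical_distance] = tuple(combination)
--     return dict_distance
-- ===== SOURCE B (Python) =====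
-- def calculate_certain_logical_distances(units, direction='x'):
--     if direction == 'x':
--         diffs = [b[0] - a[0] for a, b in zip(units, units[1:7])]
--     elif direction == 'y':
--         diffs = [b[1] - a[1] for a, b in zip(units, units[1:7])]
--     else:
--         diffs = []
--     return {ld: tuple(diffs[:ld]) for ld in range(1, 7)}
-- ===== Notes on version B (the rewrite author's own statement) =====
-- stated objective: simpler
-- what changed: B computes the difference list once by zipping units with its shifted slice and then takes prefixes of it with a dict comprehension, instead of A's nested loops that rebuild each prefix element-by-element with explicit indexing.
import Mathlib
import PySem

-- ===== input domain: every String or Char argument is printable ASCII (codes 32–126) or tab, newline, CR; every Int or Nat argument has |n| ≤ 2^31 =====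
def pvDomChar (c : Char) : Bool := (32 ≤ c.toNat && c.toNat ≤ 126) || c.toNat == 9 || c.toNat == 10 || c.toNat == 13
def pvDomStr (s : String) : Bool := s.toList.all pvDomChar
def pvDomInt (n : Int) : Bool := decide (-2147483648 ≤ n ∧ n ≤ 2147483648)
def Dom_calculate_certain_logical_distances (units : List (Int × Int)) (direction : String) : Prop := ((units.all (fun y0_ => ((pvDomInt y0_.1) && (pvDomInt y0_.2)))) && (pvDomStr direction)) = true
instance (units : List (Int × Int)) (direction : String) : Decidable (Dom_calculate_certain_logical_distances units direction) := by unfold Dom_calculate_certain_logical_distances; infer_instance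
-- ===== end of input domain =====

-- B computes the six consecutive differences once by zipping units with its shifted slice and
-- builds the dict by taking prefixes of that list (simpler: no nested indexed loops); equal to A
-- wherever the Python A returns.

-- ===== PORT A =====
-- A: for each ld in 1..6, rebuild the whole list of consecutive differences from scratch.
-- units[i] is ported as (pyGet? units i).getD (0,0); Pre_ excludes the out-of-range inputs
-- where Python raises IndexError, so the default is never reached inside the claim.
def calculate_certain_logical_distances (units : List (Int × Int)) (direction : String) : List (Int × List Int) :=
  ((PySem.List.pyRange 1 7 1).foldl (fun (d : PySem.Dict Int (List Int)) ld =>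
    let combination : List Int :=
      (PySem.List.pyRange 0 ld 1).foldl (fun c i =>
        if direction == "x" then
          c ++ [((PySem.List.pyGet? units (i + 1)).getD (0, 0)).1 - ((PySem.List.pyGet? units i).getD (0, 0)).1]
        else if direction == "y" then
          c ++ [((PySem.List.pyGet? units (i + 1)).getD (0, 0)).2 - ((PySem.List.pyGet? units i).getD (0, 0)).2]
        else c) []
    PySem.Dict.insert d ld combination) PySem.Dict.empty).items

-- ===== PORT B =====
-- B: diffs = the consecutive differences from zip(units, units[1:7]); dict comprehension
-- {ld: diffs[:ld]} ported as a fold of inserts over the range, .items at the end.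
def calculate_certain_logical_distances_alt (units : List (Int × Int)) (direction : String) : List (Int × List Int) :=
  let diffs : List Int :=
    if direction == "x" then
      (units.zip (PySem.List.slice units (some 1) (some 7))).map (fun p => p.2.1 - p.1.1)
    else if direction == "y" then
      (units.zip (PySem.List.slice units (some 1) (some 7))).map (fun p => p.2.2 - p.1.2)
    else []
  ((PySem.List.pyRange 1 7 1).foldl (fun (d : PySem.Dict Int (List Int)) ld =>
    PySem.Dict.insert d ld (PySem.List.slice diffs none (some ld))) PySem.Dict.empty).items

-- ===== PRECONDITION & SPEC =====
-- Pre_: the Python A raises IndexError exactly when direction is 'x' or 'y' and units has fewer than 7 elements.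
def Pre_calculate_certain_logical_distances (units : List (Int × Int)) (direction : String) : Prop :=
  (direction = "x" ∨ direction = "y") → 7 ≤ units.length
instance (units : List (Int × Int)) (direction : String) : Decidable (Pre_calculate_certain_logical_distances units direction) := by unfold Pre_calculate_certain_logical_distances; infer_instance
def pvWitness_calculate_certain_logical_distances : (List (Int × Int)) × String :=
  ([(0, 0), (1, 2), (3, 1), (4, 4), (6, 5), (7, 7), (9, 8)], "x")

def Spec_calculate_certain_logical_distances (units : List (Int × Int)) (direction : String) (out : List (Int × List Int)) : Prop := out = calculate_certain_logical_distances_alt units direction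
instance (units : List (Int × Int)) (direction : String) (out : List (Int × List Int)) : Decidable (Spec_calculate_certain_logical_distances units direction out) := by unfold Spec_calculate_certain_logical_distances; infer_instance

-- ===== CLAIM =====
def Claim_equal_calculate_certain_logical_distances : Prop := ∀ (units : List (Int × Int)) (direction : String), Dom_calculate_certain_logical_distances units direction → Pre_calculate_certain_logical_distances units direction → Spec_calculate_certain_logical_distances units direction (calculate_certain_logical_distances units direction)

-- ===== LEMMAS AND PROOFS =====

-- The concrete ranges both ports fold over (k = 6 is fixed in the source).
theorem pvRanges : PySem.List.pyRange 1 7 1 = [1, 2, 3, 4, 5, 6] ∧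
    PySem.List.pyRange 0 1 1 = [0] ∧ PySem.List.pyRange 0 2 1 = [0, 1] ∧
    PySem.List.pyRange 0 3 1 = [0, 1, 2] ∧ PySem.List.pyRange 0 4 1 = [0, 1, 2, 3] ∧
    PySem.List.pyRange 0 5 1 = [0, 1, 2, 3, 4] ∧ PySem.List.pyRange 0 6 1 = [0, 1, 2, 3, 4, 5] := by
  decide

-- ===== VERDICT =====
theorem calculate_certain_logical_distances_spec : Claim_equal_calculate_certain_logical_distances := by
  intro units direction _ hpre
  unfold Spec_calculate_certain_logical_distances
  by_cases hx : direction = "x"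
  · subst hx
    have h7 : 7 ≤ units.length := hpre (Or.inl rfl)
    match units, h7 with
    | u0 :: u1 :: u2 :: u3 :: u4 :: u5 :: u6 :: rest, _ =>
      simp [calculate_certain_logical_distances, calculate_certain_logical_distances_alt,
        pvRanges, List.foldl, PySem.List.pyGet?, PySem.List.pyIdx?,
        show ∀ k:Int, k ≤ 7 → k ≤ (rest.length:Int) + 1 + 1 + 1 + 1 + 1 + 1 + 1 from by omega,
        show ∀ k:Int, k ≤ 6 → k ≤ (rest.length:Int) + 1 + 1 + 1 + 1 + 1 + 1 from by omega,
        show ∀ k:Int, k ≤ 5 → k ≤ (rest.length:Int) + 1 + 1 + 1 + 1 + 1 from by omega,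
        PySem.List.slice, PySem.Dict.insert, PySem.Dict.empty]
  · by_cases hy : direction = "y"
    · subst hy
      have h7 : 7 ≤ units.length := hpre (Or.inr rfl)
      match units, h7 with
      | u0 :: u1 :: u2 :: u3 :: u4 :: u5 :: u6 :: rest, _ =>
        simp [calculate_certain_logical_distances, calculate_certain_logical_distances_alt,
          pvRanges, List.foldl, PySem.List.pyGet?, PySem.List.pyIdx?,
        show ∀ k:Int, k ≤ 7 → k ≤ (rest.length:Int) + 1 + 1 + 1 + 1 + 1 + 1 + 1 from by omega,
        show ∀ k:Int, k ≤ 6 → k ≤ (rest.length:Int) + 1 + 1 + 1 + 1 + 1 + 1 from by omega,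
        show ∀ k:Int, k ≤ 5 → k ≤ (rest.length:Int) + 1 + 1 + 1 + 1 + 1 from by omega,
          PySem.List.slice, PySem.Dict.insert, PySem.Dict.empty]
    · have hbx : (direction == "x") = false := by simp [hx]
      have hby : (direction == "y") = false := by simp [hy]
      simp [calculate_certain_logical_distances, calculate_certain_logical_distances_alt,
        hbx, hby, pvRanges, List.foldl,
        PySem.List.slice, PySem.Dict.insert, PySem.Dict.empty]
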